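-- pv_equiv track=rewrite | github.com/pedrojosehv/CVPilot | checkpoints/src_backup_20250824_172927/utils/skills_templates.py | detect_role_type
-- ===== SOURCE A (Python) =====
-- def detect_role_type(job_title: str, company: str = "", skills: list = None) -> str:
--     """Detect role type from job title and context"""
--     job_title_lower = job_title.lower()
--     company_lower = company.lower() if company else ""
--
--     # AI/ML detection
--     if any(keyword in job_title_lower for keyword in [
--         'ai', 'artificial intelligence', 'machine learning', 'ml', 'deep learning',
--         'computer vision', 'natural language', 'nlp', 'data science', 'neural'
--     ]):
--         return 'ai_ml'
--
--     # Product Management detection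
--     if any(keyword in job_title_lower for keyword in [
--         'product manager', 'product owner', 'product lead', 'product director',
--         'product strategy', 'product development'
--     ]):
--         return 'product'
--
--     # Data Science/Analytics detection
--     if any(keyword in job_title_lower for keyword in [
--         'data scientist', 'data analyst', 'analytics', 'business intelligence',
--         'data engineer', 'statistical', 'bi analyst'
--     ]):
--         return 'data'
--
--     # Construction/Engineering detection
--     if any(keyword in job_title_lower for keyword in [
--         'construction', 'civil engineer', 'architect', 'site manager',
--         'infrastructure', 'building', 'structural'
--     ]):
--         return 'construction'
--
--     # Healthcare/Pharma detection
--     if any(keyword in job_title_lower for keyword in [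
--         'healthcare', 'medical', 'pharmaceutical', 'clinical', 'biotech',
--         'patient', 'clinical trial', 'medical device'
--     ]) or any(keyword in company_lower for keyword in ['hospital', 'clinic', 'pharma', 'medical']):
--         return 'healthcare'
--
--     # Finance/Banking detection
--     if any(keyword in job_title_lower for keyword in [
--         'finance', 'financial', 'banking', 'investment', 'risk',
--         'portfolio', 'trading', 'compliance'
--     ]) or any(keyword in company_lower for keyword in ['bank', 'financial', 'investment']):
--         return 'finance'
--
--     # Manufacturing detection
--     if any(keyword in job_title_lower for keyword in [
--         'manufacturing', 'production', 'industrial', 'factory', 'plant',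
--         'operations', 'supply chain', 'logistics'
--     ]):
--         return 'manufacturing'
--
--     # IT/Technology detection
--     if any(keyword in job_title_lower for keyword in [
--         'it', 'technology', 'software', 'digital', 'tech', 'systems',
--         'development', 'programming', 'technical'
--     ]):
--         return 'it_tech'
--
--     # Default to general
--     return 'general'
-- ===== SOURCE B (Python) =====
-- _TITLE_GROUPS = [
--     ['ai', 'artificial intelligence', 'machine learning', 'ml', 'deep learning',
--      'computer vision', 'natural language', 'nlp', 'data science', 'neural'],
--     ['product manager', 'product owner', 'product lead', 'product director',
--      'product strategy', 'product development'],
--     ['data scientist', 'data analyst', 'analytics', 'business intelligence',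
--      'data engineer', 'statistical', 'bi analyst'],
--     ['construction', 'civil engineer', 'architect', 'site manager',
--      'infrastructure', 'building', 'structural'],
--     ['healthcare', 'medical', 'pharmaceutical', 'clinical', 'biotech',
--      'patient', 'clinical trial', 'medical device'],
--     ['finance', 'financial', 'banking', 'investment', 'risk',
--      'portfolio', 'trading', 'compliance'],
--     ['manufacturing', 'production', 'industrial', 'factory', 'plant',
--      'operations', 'supply chain', 'logistics'],
--     ['it', 'technology', 'software', 'digital', 'tech', 'systems',
--      'development', 'programming', 'technical'],
-- ]
-- _COMPANY_GROUPS = [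
--     (4, ['hospital', 'clinic', 'pharma', 'medical']),
--     (5, ['bank', 'financial', 'investment']),
-- ]
-- TITLE_KWS = [(kw, r) for r, kws in enumerate(_TITLE_GROUPS) for kw in kws]
-- COMPANY_KWS = [(kw, r) for r, kws in _COMPANY_GROUPS for kw in kws]
-- ROLES = ['ai_ml', 'product', 'data', 'construction', 'healthcare',
--          'finance', 'manufacturing', 'it_tech', 'general']
--
--
-- def detect_role_type(job_title: str, company: str = "", skills: list = None) -> str:
--     # minimum-rank aggregation: scan every keyword, keep the smallest matched rank
--     jt = job_title.lower()
--     co = company.lower()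
--     best = 8
--     for kw, r in TITLE_KWS:
--         if r < best and kw in jt:
--             best = r
--     for kw, r in COMPANY_KWS:
--         if r < best and kw in co:
--             best = r
--     return ROLES[best]
-- ===== Notes on version B (the rewrite author's own statement) =====
-- stated objective: alternative
-- what changed: Replaces the eight-branch early-return if-cascade with a minimum-rank aggregation: all keywords are flattened once into (keyword, rank) pairs, a single full scan keeps the smallest matched rank, and the role is read off a roles array.
import Mathlib
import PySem

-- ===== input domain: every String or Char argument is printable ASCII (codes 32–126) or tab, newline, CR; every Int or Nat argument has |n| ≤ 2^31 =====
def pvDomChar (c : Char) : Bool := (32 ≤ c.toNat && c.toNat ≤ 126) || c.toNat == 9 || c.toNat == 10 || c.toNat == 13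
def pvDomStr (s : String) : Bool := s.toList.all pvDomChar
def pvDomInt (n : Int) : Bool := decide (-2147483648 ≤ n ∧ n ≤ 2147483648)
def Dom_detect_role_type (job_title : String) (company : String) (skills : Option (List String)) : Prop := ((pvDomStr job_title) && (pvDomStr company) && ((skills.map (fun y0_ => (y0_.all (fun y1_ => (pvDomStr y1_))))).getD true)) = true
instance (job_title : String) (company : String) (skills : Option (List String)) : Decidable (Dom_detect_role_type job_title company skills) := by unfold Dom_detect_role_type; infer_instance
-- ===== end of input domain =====

-- B replaces A's eight-branch early-return if-cascade by a minimum-rank aggregation over a flattened (keyword, rank) list (alternative; same cost).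


-- ===== PORT A =====
-- 'kw in s' on lowercased strings; helper = Python's 'any(k in s for k in kws)'
def pvAnyIn (kws : List String) (s : String) : Bool :=
  kws.any (fun k => PySem.Str.isIn k s)

def detect_role_type (job_title : String) (company : String) (_skills : Option (List String)) : String :=
  let job_title_lower := PySem.Str.lower job_title
  let company_lower := if company ≠ "" then PySem.Str.lower company else ""
  if pvAnyIn ["ai", "artificial intelligence", "machine learning", "ml", "deep learning",
      "computer vision", "natural language", "nlp", "data science", "neural"] job_title_lower then "ai_ml"
  else if pvAnyIn ["product manager", "product owner", "product lead", "product director",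
      "product strategy", "product development"] job_title_lower then "product"
  else if pvAnyIn ["data scientist", "data analyst", "analytics", "business intelligence",
      "data engineer", "statistical", "bi analyst"] job_title_lower then "data"
  else if pvAnyIn ["construction", "civil engineer", "architect", "site manager",
      "infrastructure", "building", "structural"] job_title_lower then "construction"
  else if pvAnyIn ["healthcare", "medical", "pharmaceutical", "clinical", "biotech",
      "patient", "clinical trial", "medical device"] job_title_lower
      || pvAnyIn ["hospital", "clinic", "pharma", "medical"] company_lower then "healthcare"
  else if pvAnyIn ["finance", "financial", "banking", "investment", "risk",
      "portfolio", "trading", "compliance"] job_title_lower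
      || pvAnyIn ["bank", "financial", "investment"] company_lower then "finance"
  else if pvAnyIn ["manufacturing", "production", "industrial", "factory", "plant",
      "operations", "supply chain", "logistics"] job_title_lower then "manufacturing"
  else if pvAnyIn ["it", "technology", "software", "digital", "tech", "systems",
      "development", "programming", "technical"] job_title_lower then "it_tech"
  else "general"

-- ===== PORT B =====
-- Source B's module-level data: title keyword groups in priority order, company groups with their ranks
def pvTitleGroups : List (List String) :=
  [["ai", "artificial intelligence", "machine learning", "ml", "deep learning",
    "computer vision", "natural language", "nlp", "data science", "neural"],
   ["product manager", "product owner", "product lead", "product director",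
    "product strategy", "product development"],
   ["data scientist", "data analyst", "analytics", "business intelligence",
    "data engineer", "statistical", "bi analyst"],
   ["construction", "civil engineer", "architect", "site manager",
    "infrastructure", "building", "structural"],
   ["healthcare", "medical", "pharmaceutical", "clinical", "biotech",
    "patient", "clinical trial", "medical device"],
   ["finance", "financial", "banking", "investment", "risk",
    "portfolio", "trading", "compliance"],
   ["manufacturing", "production", "industrial", "factory", "plant",
    "operations", "supply chain", "logistics"],
   ["it", "technology", "software", "digital", "tech", "systems",
    "development", "programming", "technical"]]

def pvCompanyGroups : List (Int × List String) :=
  [(4, ["hospital", "clinic", "pharma", "medical"]),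
   (5, ["bank", "financial", "investment"])]

-- TITLE_KWS / COMPANY_KWS: the flattening comprehensions of Source B
def pvTitleKws : List (String × Int) :=
  (PySem.List.enumerate pvTitleGroups).flatMap (fun p => p.2.map (fun k => (k, p.1)))

def pvCompanyKws : List (String × Int) :=
  pvCompanyGroups.flatMap (fun p => p.2.map (fun k => (k, p.1)))

def pvRoles : List String :=
  ["ai_ml", "product", "data", "construction", "healthcare",
   "finance", "manufacturing", "it_tech", "general"]

-- the min-rank scan of Source B ('if r < best and kw in s: best = r')
def pvMinRank (s : String) (best : Int) (kws : List (String × Int)) : Int :=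
  kws.foldl (fun b p => if p.2 < b && PySem.Str.isIn p.1 s then p.2 else b) best

def detect_role_type_alt (job_title : String) (company : String) (_skills : Option (List String)) : String :=
  let jt := PySem.Str.lower job_title
  let co := PySem.Str.lower company
  let best := pvMinRank co (pvMinRank jt 8 pvTitleKws) pvCompanyKws
  -- ROLES[best]; best is always in range 0..8, so pyGet? never yields none
  (PySem.List.pyGet? pvRoles best).getD "general"

-- ===== PRECONDITION & SPEC =====
def Spec_detect_role_type (job_title : String) (company : String) (skills : Option (List String)) (out : String) : Prop := out = detect_role_type_alt job_title company skills
instance (job_title : String) (company : String) (skills : Option (List String)) (out : String) : Decidable (Spec_detect_role_type job_title company skills out) := by unfold Spec_detect_role_type; infer_instance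

-- ===== CLAIM (what is proved, stated in full; the proofs are below) =====
def Claim_equal_detect_role_type : Prop := ∀ (job_title : String) (company : String) (skills : Option (List String)), Dom_detect_role_type job_title company skills → Spec_detect_role_type job_title company skills (detect_role_type job_title company skills)

-- ===== LEMMAS AND PROOFS =====

-- one min-rank update: the effect of scanning a whole keyword group whose keywords all carry rank r
def pvStep (r : Int) (a : Bool) (b : Int) : Int := if r < b && a then r else b

theorem minRank_append (s : String) (b : Int) (l1 l2 : List (String × Int)) :
    pvMinRank s b (l1 ++ l2) = pvMinRank s (pvMinRank s b l1) l2 := by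
  simp [pvMinRank]

-- folding the min-rank step over a constant-rank group from accumulator b
theorem minRank_group (s : String) (r : Int) (ks : List String) (b : Int) :
    pvMinRank s b (ks.map (fun k => (k, r))) =
    pvStep r (ks.any fun k => PySem.Str.isIn k s) b := by
  unfold pvStep
  induction ks generalizing b with
  | nil => simp [pvMinRank]
  | cons k ks ih =>
    simp only [pvMinRank, List.map_cons, List.foldl_cons, List.any_cons] at ih ⊢
    rw [ih]
    by_cases hrb : r < b
    · by_cases hk : PySem.Str.isIn k s = true
      · simp only [hk]; simp [hrb]
      · simp only [Bool.not_eq_true] at hk; simp only [hk]; simp [hrb]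
    · simp [hrb]

theorem lower_empty : PySem.Str.lower "" = "" := by decide

-- the cascade and the min-rank aggregation agree for every combination of group-match booleans
theorem cascade_key : ∀ (a0 a1 a2 a3 a4 a5 a6 a7 c4 c5 : Bool),
    (if a0 then "ai_ml"
     else if a1 then "product"
     else if a2 then "data"
     else if a3 then "construction"
     else if a4 || c4 then "healthcare"
     else if a5 || c5 then "finance"
     else if a6 then "manufacturing"
     else if a7 then "it_tech"
     else "general") =
    (PySem.List.pyGet? pvRoles
      (pvStep 5 c5 (pvStep 4 c4 (pvStep 7 a7 (pvStep 6 a6 (pvStep 5 a5 (pvStep 4 a4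
        (pvStep 3 a3 (pvStep 2 a2 (pvStep 1 a1 (pvStep 0 a0 8))))))))))).getD "general" := by
  decide

-- ===== VERDICT (by name: the statement is the Claim_ definition above) =====
theorem detect_role_type_spec : Claim_equal_detect_role_type := by
  intro job_title company skills _
  unfold Spec_detect_role_type detect_role_type detect_role_type_alt
  have hco : (if company ≠ "" then PySem.Str.lower company else "") = PySem.Str.lower company := by
    by_cases h : company = "" <;> simp [h, lower_empty]
  rw [hco]
  generalize PySem.Str.lower job_title = jt
  generalize PySem.Str.lower company = co
  unfold pvTitleKws pvCompanyKws pvTitleGroups pvCompanyGroups pvAnyIn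
  simp only [PySem.List.enumerate_cons, PySem.List.enumerate_nil, List.flatMap_cons,
    List.flatMap_nil, List.append_nil, Int.reduceAdd, minRank_append, minRank_group]
  exact cascade_key _ _ _ _ _ _ _ _ _ _
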